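-- pv_equiv track=rewrite | github.com/primrose101/CS322 | finite_state_machines/keywords.py | kwfloat_fsm
-- ===== SOURCE A (Python) =====
-- def kwfloat_fsm(string_input, index):
--     i = index
--
--     table = [
--         [1, 6, 6, 6, 6, 6],
--         [6, 2, 6, 6, 6, 6],
--         [6, 6, 3, 6, 6, 6],
--         [6, 6, 6, 4, 6, 6],
--         [6, 6, 6, 6, 5, 6],
--         [6, 6, 6, 6, 6, 6],
--         [6, 6, 6, 6, 6, 6],
--     ]
--
--     state = 0
--     inputstate = 0
--
--     string_length = len(string_input)
--
--     while i != string_length: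
--         if string_input[i] == 'F':
--             inputstate = 0
--         elif string_input[i] == 'L':
--             inputstate = 1
--         elif string_input[i] == 'O':
--             inputstate = 2
--         elif string_input[i] == 'A':
--             inputstate = 3
--         elif string_input[i] == 'T':
--             inputstate = 4
--         else:
--             inputstate = 5
--
--         state = table[state][inputstate]
--
--         if state == 6:
--             break
--
--         i += 1
--
--     return i - index
-- ===== SOURCE B (Python) =====
-- def kwfloat_fsm(string_input, index):
--     target = "FLOAT"
--     n = len(string_input)
--     i = index
--     count = 0
--     for ch in target:
--         if i != n and string_input[i] == ch:
--             count += 1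
--             i += 1
--         else:
--             break
--     return count
-- ===== Notes on version B (the rewrite author's own statement) =====
-- stated objective: simpler
-- what changed: Replaces the FSM with a maintained state integer and a 7x6 transition table by a direct character-by-character comparison of the string against the target "FLOAT", counting matched characters.
import Mathlib
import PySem

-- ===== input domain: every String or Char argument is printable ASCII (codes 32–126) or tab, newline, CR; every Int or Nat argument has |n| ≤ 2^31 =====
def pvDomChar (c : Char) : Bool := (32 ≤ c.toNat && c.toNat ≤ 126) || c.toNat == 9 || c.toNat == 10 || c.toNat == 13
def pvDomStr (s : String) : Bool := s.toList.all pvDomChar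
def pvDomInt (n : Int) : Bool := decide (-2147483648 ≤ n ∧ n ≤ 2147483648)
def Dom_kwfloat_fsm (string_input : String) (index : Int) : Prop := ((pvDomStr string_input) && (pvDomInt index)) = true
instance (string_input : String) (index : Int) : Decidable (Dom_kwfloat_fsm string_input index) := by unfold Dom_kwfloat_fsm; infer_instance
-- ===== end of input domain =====

-- B replaces A's maintained FSM state and transition table by a direct character-by-character
-- comparison against the target "FLOAT" (objective: simpler; same behaviour, including where A raises).

-- ===== PORT A =====
-- A's transition table, verbatim.
def kwTable : List (List Nat) :=
  [[1, 6, 6, 6, 6, 6],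
   [6, 2, 6, 6, 6, 6],
   [6, 6, 3, 6, 6, 6],
   [6, 6, 6, 4, 6, 6],
   [6, 6, 6, 6, 5, 6],
   [6, 6, 6, 6, 6, 6],
   [6, 6, 6, 6, 6, 6]]

-- A's while loop; returns the final i.  On the IndexError path (pyGet? = none,
-- excluded by Pre_) it returns the current i.
def kwA_loop (cs : List Char) (i : Int) (state : Nat) : Int :=
  if i = (cs.length : Int) then i
  else
    match h2 : PySem.List.pyGet? cs i with
    | none => i  -- Python raises IndexError here; outside Pre_
    | some c =>
      let inputstate : Nat :=
        if c = 'F' then 0 else if c = 'L' then 1 else if c = 'O' then 2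
        else if c = 'A' then 3 else if c = 'T' then 4 else 5
      let state' := (kwTable.getD state []).getD inputstate 6
      if state' = 6 then i else kwA_loop cs (i + 1) state'
termination_by ((cs.length : Int) + 1 - i).toNat
decreasing_by
  have hin : ¬ PySem.List.pyGet? cs i = none := by simp [h2]
  rw [PySem.List.pyGet?_eq_none_iff] at hin
  simp [PySem.Raise.InRange] at hin
  omega

def kwfloat_fsm (string_input : String) (index : Int) : Int :=
  kwA_loop string_input.toList index 0 - index

-- ===== PORT B =====
-- B's for loop over the characters of "FLOAT", maintaining (i, count).
def kwB_loop (cs : List Char) (n : Int) : List Char → Int → Int → Int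
  | [], _, count => count
  | ch :: rest, i, count =>
    if i ≠ n then
      match PySem.List.pyGet? cs i with
      | none => count  -- Python raises IndexError here; outside Pre_
      | some c => if c = ch then kwB_loop cs n rest (i + 1) (count + 1) else count
    else count

def kwfloat_fsm_alt (string_input : String) (index : Int) : Int :=
  kwB_loop string_input.toList (string_input.toList.length : Int)
    "FLOAT".toList index 0

-- ===== PRECONDITION & SPEC =====
-- Pre_ excludes exactly the inputs where Python A raises IndexError (index out of
-- range of the string; both A and B raise there).
def Pre_kwfloat_fsm (string_input : String) (index : Int) : Prop :=
  -(string_input.toList.length : Int) ≤ index ∧ index ≤ (string_input.toList.length : Int)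
instance (string_input : String) (index : Int) : Decidable (Pre_kwfloat_fsm string_input index) := by unfold Pre_kwfloat_fsm; infer_instance

def pvWitness_kwfloat_fsm : String × Int := ("FLOx", 0)

def Spec_kwfloat_fsm (string_input : String) (index : Int) (out : Int) : Prop := out = kwfloat_fsm_alt string_input index
instance (string_input : String) (index : Int) (out : Int) : Decidable (Spec_kwfloat_fsm string_input index out) := by unfold Spec_kwfloat_fsm; infer_instance

-- ===== CLAIM (what is proved, stated in full; the proofs are below) =====
def Claim_equal_kwfloat_fsm : Prop := ∀ (string_input : String) (index : Int), Dom_kwfloat_fsm string_input index → Pre_kwfloat_fsm string_input index → Spec_kwfloat_fsm string_input index (kwfloat_fsm string_input index)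

-- ===== LEMMAS AND PROOFS =====

-- count shift: the accumulator only adds.
lemma kwB_shift (cs : List Char) (n : Int) (rest : List Char) :
    ∀ (i c : Int), kwB_loop cs n rest i c = c + kwB_loop cs n rest i 0 := by
  induction rest with
  | nil => intro i c; simp [kwB_loop]
  | cons ch rest ih =>
    intro i c
    rw [kwB_loop, kwB_loop]
    split
    · rcases h : PySem.List.pyGet? cs i with _ | x
      · simp
      · simp only
        split
        · rw [ih (i+1) (c+1), ih (i+1) (0+1)]; omega
        · simp
    · simp

-- In FSM state 5, any further character leads to state 6 (break).
lemma kwA_five (cs : List Char) (i : Int) : kwA_loop cs i 5 = i := by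
  rw [kwA_loop]
  split
  · rfl
  · rcases h : PySem.List.pyGet? cs i with _ | c
    · simp
    · simp only [kwTable]
      split_ifs <;> simp_all [List.getD]

-- One FSM step in state k (< 5) equals one comparison step of B against "FLOAT"[k].
lemma kwA_step (cs : List Char) (k : Nat) (hk : k < 5)
    (ih : ∀ i : Int, kwA_loop cs i (k+1) = i + kwB_loop cs (cs.length : Int) ("FLOAT".toList.drop (k+1)) i 0)
    (i : Int) :
    kwA_loop cs i k = i + kwB_loop cs (cs.length : Int) ("FLOAT".toList.drop k) i 0 := by
  have ht : "FLOAT".toList.drop k =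
      (['F','L','O','A','T'].getD k 'F') :: "FLOAT".toList.drop (k+1) := by
    interval_cases k <;> decide
  rw [ht, kwA_loop, kwB_loop]
  by_cases hi : i = (cs.length : Int)
  · simp [hi]
  · simp only [if_neg hi, if_pos (by exact hi : i ≠ (cs.length : Int))]
    rcases h : PySem.List.pyGet? cs i with _ | c
    · simp
    · simp only
      by_cases hc : c = (['F','L','O','A','T'].getD k 'F')
      · -- matching character: FSM goes to state k+1, B counts it
        have hstate : ((kwTable.getD k []).getD
            (if c = 'F' then 0 else if c = 'L' then 1 else if c = 'O' then 2
             else if c = 'A' then 3 else if c = 'T' then 4 else 5) 6) = k + 1 := by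
          subst hc; interval_cases k <;> decide
        simp only [hstate, if_pos hc]
        rw [if_neg (by omega), ih (i+1), kwB_shift cs (cs.length : Int) _ (i+1) (0+1)]
        omega
      · -- mismatching character: FSM goes to state 6 (break), B stops
        have hstate : ((kwTable.getD k []).getD
            (if c = 'F' then 0 else if c = 'L' then 1 else if c = 'O' then 2
             else if c = 'A' then 3 else if c = 'T' then 4 else 5) 6) = 6 := by
          interval_cases k <;> (split_ifs <;> first | rfl | (exfalso; apply hc; simp_all))
        rw [List.getD_eq_getElem?_getD] at hc
        simp only [hstate]
        simp [hc]

lemma kwA_eq_kwB (cs : List Char) (i : Int) :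
    kwA_loop cs i 0 = i + kwB_loop cs (cs.length : Int) "FLOAT".toList i 0 := by
  have h5 : ∀ i : Int, kwA_loop cs i 5 = i + kwB_loop cs (cs.length : Int) ("FLOAT".toList.drop 5) i 0 := by
    intro i; rw [kwA_five]; simp [kwB_loop]
  have h4 := fun i => kwA_step cs 4 (by omega) h5 i
  have h3 := fun i => kwA_step cs 3 (by omega) h4 i
  have h2 := fun i => kwA_step cs 2 (by omega) h3 i
  have h1 := fun i => kwA_step cs 1 (by omega) h2 i
  have h0 := fun i => kwA_step cs 0 (by omega) h1 i
  simpa using h0 i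

-- ===== VERDICT (by name: the statement is the Claim_ definition above) =====
theorem kwfloat_fsm_spec : Claim_equal_kwfloat_fsm := by
  intro s index _ _
  unfold Spec_kwfloat_fsm kwfloat_fsm kwfloat_fsm_alt
  rw [kwA_eq_kwB]
  omega
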